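-- pv_equiv track=rewrite | github.com/vadimkhodko/pp1 | 05-Test1/p1.py | f
-- ===== SOURCE A (Python) =====
-- def f(x):
--     if (len(x) != 16):
--         return "incorrect number"
--     else:
--         list1 = list(x)
--         for i in range(2,12):
--             list1[i] = "*"
--         x = ''.join(list1)
--         return x
-- ===== SOURCE B (Python) =====
-- def f(x):
--     if (len(x) != 16):
--         return "incorrect number"
--     else:
--         return x[:2] + "*" * 10 + x[12:]
-- ===== Notes on version B (the rewrite author's own statement) =====
-- stated objective: simpler
-- what changed: Replaces the list() copy, the index loop over range(2,12) and the join with a closed-form concatenation of three pieces: prefix slice, a ten-star mask, suffix slice.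
import Mathlib
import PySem

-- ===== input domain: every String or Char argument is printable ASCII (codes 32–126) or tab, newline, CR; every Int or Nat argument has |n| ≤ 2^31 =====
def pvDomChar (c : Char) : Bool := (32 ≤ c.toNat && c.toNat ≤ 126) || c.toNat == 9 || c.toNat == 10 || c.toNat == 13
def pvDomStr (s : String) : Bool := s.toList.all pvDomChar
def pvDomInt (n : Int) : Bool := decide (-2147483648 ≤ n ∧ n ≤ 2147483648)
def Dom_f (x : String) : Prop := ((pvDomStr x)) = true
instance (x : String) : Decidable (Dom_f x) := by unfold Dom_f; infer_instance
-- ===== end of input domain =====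

-- B replaces A's list copy + index loop + join by the closed-form concatenation x[:2] + "*"*10 + x[12:] (simpler).

-- ===== PORT A =====
def f (x : String) : String :=
  if PySem.Str.len x ≠ 16 then "incorrect number"
  else
    let list1 := x.toList
    let list1 := (PySem.List.pyRange 2 12 1).foldl (fun l i => l.set i.toNat '*') list1
    String.mk list1

-- ===== PORT B =====
def f_alt (x : String) : String :=
  if PySem.Str.len x ≠ 16 then "incorrect number"
  else
    String.mk (PySem.List.slice x.toList none (some 2)
      ++ PySem.List.pyRepeat ['*'] 10
      ++ PySem.List.slice x.toList (some 12) none)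

-- ===== PRECONDITION & SPEC =====
def Spec_f (x : String) (out : String) : Prop := out = f_alt x
instance (x : String) (out : String) : Decidable (Spec_f x out) := by unfold Spec_f; infer_instance

-- ===== CLAIM (what is proved, stated in full; the proofs are below) =====
def Claim_equal_f : Prop := ∀ (x : String), Dom_f x → Spec_f x (f x)

-- ===== LEMMAS AND PROOFS =====

-- On a 16-element list, overwriting positions 2..11 equals take 2 ++ ten stars ++ drop 12.
theorem f_mask_eq (l : List Char) (h : l.length = 16) :
    (PySem.List.pyRange 2 12 1).foldl (fun l i => l.set i.toNat '*') l
      = l.take 2 ++ List.replicate 10 '*' ++ l.drop 12 := by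
  match l, h with
  | [a,b,c,d,e,g,h1,h2,h3,h4,h5,h6,h7,h8,h9,h10], _ => rfl

-- ===== VERDICT (by name: the statement is the Claim_ definition above) =====
theorem f_spec : Claim_equal_f := by
  intro x _
  unfold Spec_f f f_alt
  by_cases h : PySem.Str.len x = 16
  · have hl : x.toList.length = 16 := by
      have := PySem.Str.len_eq x; omega
    simp only [h, if_neg (by omega : ¬ (16 : Int) ≠ 16)]
    rw [f_mask_eq _ hl]
    rw [PySem.List.slice_to, PySem.List.slice_from]
    · simp [PySem.List.pyRepeat_singleton, List.replicate]
    · norm_num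
    · norm_num
  · rw [if_pos h, if_pos h]
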